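-- pv_equiv track=rewrite | github.com/SowpatiLab/ATaRVa | ATARVA/baseline.py | flank_adjustment
-- ===== SOURCE A (Python) =====
-- def flank_adjustment(loci_coords, exact_loci_coords, right_flank_list, left_flank_list, tracker_idx):
--     # Adjusting flanks based on the nearby repeat region
--     for idx,locus in enumerate(loci_coords):
--         current_left = left_flank_list[idx]
--         current_right = right_flank_list[idx]
--         new_left_flanks = []
--         new_right_flanks = []
--         tr_idx = tracker_idx[idx]
--         for e_idx,exact_locus in enumerate(exact_loci_coords):
--             if exact_locus[0]>locus[1]:
--                 break
--             if e_idx == tr_idx: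
--                 continue
--             if (e_idx>tr_idx) and (locus[1]>exact_locus[0]):  # after skipping locus (or) after came across the current locus, adjust the right flank dist
--                 new_right_flanks.append(locus[1]-exact_locus[0] if (locus[1]-exact_locus[0]) < current_right else current_right)
--             if (e_idx<tr_idx) and (locus[0]<exact_locus[1]): # adjust the left flank dist
--                 new_left_flanks.append(exact_locus[1] - locus[0] if (exact_locus[1] - locus[0]) < current_left else current_left) # add adjusted left flank dist for each overlapping exact repeat regions with cureent repeat region's flank on left. Zero is not to adjust any dist
--         if new_left_flanks!=[]:
--             left_flank_list[idx] -= max(new_left_flanks) # take the max value of adjusted value, so that it wont affect other exact repeats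
--         if new_right_flanks!=[]:
--             right_flank_list[idx] -= max(new_right_flanks) # take the max value of adjusted value, so that it wont affect other exact repeats
--
--     return [right_flank_list, left_flank_list]
-- ===== SOURCE B (Python) =====
-- def flank_adjustment(loci_coords, exact_loci_coords, right_flank_list, left_flank_list, tracker_idx):
--     # Staged algorithm: precompute once (a) the running maximum of exact-region
--     # starts (nondecreasing, so the scan's break point 'first start > end' becomes
--     # a binary search) and (b) a prefix-maximum table of exact-region ends (so the
--     # whole left-side inner scan becomes one O(1) table lookup, since
--     # min(cap, end - start) is monotone); the right side is a min over one slice.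
--     m = len(exact_loci_coords)
--     starts = [c[0] for c in exact_loci_coords]
--     run_max_start = []   # run_max_start[i] = max(starts[:i+1]), nondecreasing
--     r = None
--     for s in starts:
--         if r is None or s > r:
--             r = s
--         run_max_start.append(r)
--     pref_max_end = [None]  # pref_max_end[k] = max of ends[:k] (None if k == 0)
--     b = None
--     for c in exact_loci_coords:
--         if b is None or c[1] > b:
--             b = c[1]
--         pref_max_end.append(b)
--     for idx, (start, end) in enumerate(loci_coords):
--         tr = tracker_idx[idx]
--         # fb = first index with starts[fb] > end  (= where A's scan breaks),
--         # found by binary search on the running maximum.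
--         lo, hi = 0, m
--         while lo < hi:
--             mid = (lo + hi) // 2
--             if run_max_start[mid] > end:
--                 hi = mid
--             else:
--                 lo = mid + 1
--         fb = lo
--         # left flank: indices < tr (and < fb); extremal end from the prefix table
--         k = fb if tr > fb else (tr if tr > 0 else 0)
--         if k > 0 and pref_max_end[k] > start:
--             left_flank_list[idx] -= min(pref_max_end[k] - start, left_flank_list[idx])
--         # right flank: indices > tr (and < fb); extremal start = min of a slice
--         lo2 = tr + 1 if tr + 1 > 0 else 0
--         if lo2 < fb:
--             mn = min(starts[lo2:fb])
--             if mn < end: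
--                 right_flank_list[idx] -= min(end - mn, right_flank_list[idx])
--     return [right_flank_list, left_flank_list]
-- ===== Notes on version B (the rewrite author's own statement) =====
-- stated objective: alternative
-- what changed: B replaces A's fused per-locus scan (break/continue + candidate lists + max) by staged precomputation: a running-maximum-of-starts array turns A's break point into a binary search, a prefix-maximum-of-ends table turns the entire left-side inner scan into one O(1) lookup (valid because min(cap, end-start) is monotone), and the right side becomes a min over one slice.
import Mathlib
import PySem

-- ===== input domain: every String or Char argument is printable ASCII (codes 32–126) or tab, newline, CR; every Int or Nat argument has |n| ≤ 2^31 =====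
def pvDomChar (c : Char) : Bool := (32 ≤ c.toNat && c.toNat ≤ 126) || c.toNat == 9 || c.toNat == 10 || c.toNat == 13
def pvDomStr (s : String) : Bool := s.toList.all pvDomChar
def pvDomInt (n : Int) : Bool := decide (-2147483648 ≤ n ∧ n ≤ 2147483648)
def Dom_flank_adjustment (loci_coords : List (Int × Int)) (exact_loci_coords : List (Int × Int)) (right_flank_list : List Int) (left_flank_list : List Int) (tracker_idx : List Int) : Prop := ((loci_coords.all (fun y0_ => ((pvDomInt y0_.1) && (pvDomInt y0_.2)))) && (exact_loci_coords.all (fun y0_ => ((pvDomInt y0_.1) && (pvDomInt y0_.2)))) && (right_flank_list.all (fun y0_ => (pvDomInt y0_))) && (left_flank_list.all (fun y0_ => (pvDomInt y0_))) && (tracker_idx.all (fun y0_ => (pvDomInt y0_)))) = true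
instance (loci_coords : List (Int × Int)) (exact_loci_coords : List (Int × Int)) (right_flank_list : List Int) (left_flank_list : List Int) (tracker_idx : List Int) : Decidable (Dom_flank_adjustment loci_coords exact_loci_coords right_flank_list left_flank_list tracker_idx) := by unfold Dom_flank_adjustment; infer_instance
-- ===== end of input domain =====

-- B replaces A's fused per-locus scan (break/continue + candidate lists + max) by staged
-- precomputation: a running-maximum-of-starts array makes A's break point a binary search,
-- a prefix-maximum-of-ends table makes the whole left-side inner scan one O(1) lookup
-- (min(cap, end-start) is monotone), and the right side is a min over one slice.
-- A mutates the two flank lists in place and B performs the same mutation; the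
-- equivalence proved here is about the return value.


-- ===== PORT A =====
-- inner 'for e_idx,exact_locus in enumerate(exact_loci_coords)' loop: builds the two candidate lists
def fa_innerA (start end_ tr curL curR : Int) :
    List (Int × Int) → Int → List Int → List Int → List Int × List Int
  | [], _, accL, accR => (accL, accR)
  | (es, ee) :: rest, i, accL, accR =>
    if es > end_ then (accL, accR)
    else if i = tr then fa_innerA start end_ tr curL curR rest (i + 1) accL accR
    else
      let accR' := if i > tr ∧ end_ > es then
          accR ++ [if end_ - es < curR then end_ - es else curR] else accR
      let accL' := if i < tr ∧ start < ee then
          accL ++ [if ee - start < curL then ee - start else curL] else accL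
      fa_innerA start end_ tr curL curR rest (i + 1) accL' accR'

-- outer 'for idx,locus in enumerate(loci_coords)' loop, mutating the two flank lists
def fa_outerA (ex : List (Int × Int)) (tracker : List Int) :
    List (Int × Int) → Nat → List Int → List Int → List Int × List Int
  | [], _, rl, ll => (rl, ll)
  | (s, e) :: rest, idx, rl, ll =>
    let curL := ll.getD idx 0
    let curR := rl.getD idx 0
    let tr := tracker.getD idx 0
    let p := fa_innerA s e tr curL curR ex 0 [] []
    let ll' := if p.1 ≠ [] then ll.set idx (curL - ((PySem.List.max? p.1 (fun y => y)).getD 0)) else ll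
    let rl' := if p.2 ≠ [] then rl.set idx (curR - ((PySem.List.max? p.2 (fun y => y)).getD 0)) else rl
    fa_outerA ex tracker rest (idx + 1) rl' ll'

def flank_adjustment (loci_coords : List (Int × Int)) (exact_loci_coords : List (Int × Int)) (right_flank_list : List Int) (left_flank_list : List Int) (tracker_idx : List Int) : List (List Int) :=
  let p := fa_outerA exact_loci_coords tracker_idx loci_coords 0 right_flank_list left_flank_list
  [p.1, p.2]

-- ===== PORT B =====
-- running maximum of the starts list (the 'for s in starts' loop of Source B)
def fb_rmsAux : List Int → Option Int → List Int
  | [], _ => []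
  | s :: t, r =>
    let r' := match r with | none => s | some v => if s > v then s else v
    r' :: fb_rmsAux t (some r')

-- prefix maxima of the ends (the 'for c in exact_loci_coords' loop of Source B);
-- Source B's pref_max_end is [None] ++ this list
def fb_pmeAux : List (Int × Int) → Option Int → List (Option Int)
  | [], _ => []
  | c :: t, b =>
    let b' := match b with | none => c.2 | some v => if c.2 > v then c.2 else v
    some b' :: fb_pmeAux t (some b')

-- the 'while lo < hi' binary search of Source B
def fb_bsearch (rms : List Int) (e : Int) (lo hi : Nat) : Nat :=
  if h : lo < hi then
    let mid := (lo + hi) / 2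
    if rms.getD mid 0 > e then fb_bsearch rms e lo mid else fb_bsearch rms e (mid + 1) hi
  else lo
termination_by hi - lo
decreasing_by all_goals omega

-- the 'for idx, (start, end) in enumerate(loci_coords)' loop of Source B
def fb_outerB (starts rms : List Int) (pme : List (Option Int)) (m : Nat) (tracker : List Int) :
    List (Int × Int) → Nat → List Int → List Int → List Int × List Int
  | [], _, rl, ll => (rl, ll)
  | (s, e) :: rest, idx, rl, ll =>
    let tr := tracker.getD idx 0
    let fb : Int := (fb_bsearch rms e 0 m : Int)
    let k : Int := if tr > fb then fb else if tr > 0 then tr else 0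
    -- pref_max_end[k]: the entry is an Int whenever 0 < k (so the .getD 0 below is exact there)
    let M := (pme.getD k.toNat none).getD 0
    let ll' := if 0 < k ∧ s < M then ll.set idx (ll.getD idx 0 - min (M - s) (ll.getD idx 0)) else ll
    let lo2 : Int := if tr + 1 > 0 then tr + 1 else 0
    let rl' := if lo2 < fb then
        let mn := (PySem.List.min? (PySem.List.slice starts (some lo2) (some fb)) (fun y => y)).getD 0
        if mn < e then rl.set idx (rl.getD idx 0 - min (e - mn) (rl.getD idx 0)) else rl
      else rl
    fb_outerB starts rms pme m tracker rest (idx + 1) rl' ll'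

def flank_adjustment_alt (loci_coords : List (Int × Int)) (exact_loci_coords : List (Int × Int)) (right_flank_list : List Int) (left_flank_list : List Int) (tracker_idx : List Int) : List (List Int) :=
  let starts := exact_loci_coords.map (fun c => c.1)
  let rms := fb_rmsAux starts none
  let pme := (none : Option Int) :: fb_pmeAux exact_loci_coords none
  let p := fb_outerB starts rms pme exact_loci_coords.length tracker_idx loci_coords 0 right_flank_list left_flank_list
  [p.1, p.2]

-- ===== PRECONDITION & SPEC =====
-- Pre_ excludes exactly the inputs where A raises IndexError: a flank or tracker list
-- shorter than loci_coords (A reads element idx of each for every locus idx).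
def Pre_flank_adjustment (loci_coords : List (Int × Int)) (exact_loci_coords : List (Int × Int)) (right_flank_list : List Int) (left_flank_list : List Int) (tracker_idx : List Int) : Prop :=
  loci_coords.length ≤ right_flank_list.length ∧
  loci_coords.length ≤ left_flank_list.length ∧
  loci_coords.length ≤ tracker_idx.length
instance (loci_coords : List (Int × Int)) (exact_loci_coords : List (Int × Int)) (right_flank_list : List Int) (left_flank_list : List Int) (tracker_idx : List Int) : Decidable (Pre_flank_adjustment loci_coords exact_loci_coords right_flank_list left_flank_list tracker_idx) := by unfold Pre_flank_adjustment; infer_instance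

def pvWitness_flank_adjustment : (List (Int × Int)) × (List (Int × Int)) × List Int × List Int × List Int :=
  ([(0, 5)], [(1, 2)], [3], [3], [0])

def Spec_flank_adjustment (loci_coords : List (Int × Int)) (exact_loci_coords : List (Int × Int)) (right_flank_list : List Int) (left_flank_list : List Int) (tracker_idx : List Int) (out : List (List Int)) : Prop := out = flank_adjustment_alt loci_coords exact_loci_coords right_flank_list left_flank_list tracker_idx
instance (loci_coords : List (Int × Int)) (exact_loci_coords : List (Int × Int)) (right_flank_list : List Int) (left_flank_list : List Int) (tracker_idx : List Int) (out : List (List Int)) : Decidable (Spec_flank_adjustment loci_coords exact_loci_coords right_flank_list left_flank_list tracker_idx out) := by unfold Spec_flank_adjustment; infer_instance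

-- ===== CLAIM (what is proved, stated in full; the proofs are below) =====
def Claim_equal_flank_adjustment : Prop := ∀ (loci_coords : List (Int × Int)) (exact_loci_coords : List (Int × Int)) (right_flank_list : List Int) (left_flank_list : List Int) (tracker_idx : List Int), Dom_flank_adjustment loci_coords exact_loci_coords right_flank_list left_flank_list tracker_idx → Pre_flank_adjustment loci_coords exact_loci_coords right_flank_list left_flank_list tracker_idx → Spec_flank_adjustment loci_coords exact_loci_coords right_flank_list left_flank_list tracker_idx (flank_adjustment loci_coords exact_loci_coords right_flank_list left_flank_list tracker_idx)

-- ===== LEMMAS AND PROOFS =====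

-- ---- foldl max / min toolbox ----
theorem fm_le_iff (l : List Int) (a c : Int) : l.foldl max a ≤ c ↔ a ≤ c ∧ ∀ x ∈ l, x ≤ c := by
  induction l generalizing a with
  | nil => simp
  | cons x t ih =>
      simp only [List.foldl_cons, ih, List.mem_cons]
      constructor
      · rintro ⟨h1, h2⟩
        exact ⟨le_trans (le_max_left a x) h1, fun y hy => hy.elim (fun h => h ▸ le_trans (le_max_right a x) h1) (h2 y)⟩
      · rintro ⟨h1, h2⟩
        exact ⟨max_le h1 (h2 x (Or.inl rfl)), fun y hy => h2 y (Or.inr hy)⟩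

-- Python max(list) = the value v ∈ l bounding all elements (unique on Int with key id)
theorem max_id_eq_of (l : List Int) (v : Int) (hmem : v ∈ l) (hub : ∀ x ∈ l, x ≤ v) :
    PySem.List.max? l (fun y => y) = some v := by
  cases l with
  | nil => cases hmem
  | cons x t =>
      rw [PySem.List.max?_id_cons]
      congr 1
      have hle : t.foldl max x ≤ v := (fm_le_iff t x v).2 ⟨hub x (List.mem_cons_self), fun y hy => hub y (List.mem_cons_of_mem x hy)⟩
      have hge : v ≤ t.foldl max x := by
        rcases List.mem_cons.1 hmem with h | h
        · subst h; exact ((fm_le_iff t v (t.foldl max v)).1 le_rfl).1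
        · exact ((fm_le_iff t x (t.foldl max x)).1 le_rfl).2 v h
      omega

-- ---- running max of starts: characterization ----
theorem rms_length (l : List Int) (r : Option Int) : (fb_rmsAux l r).length = l.length := by
  induction l generalizing r with
  | nil => rfl
  | cons x t ih => simp [fb_rmsAux, ih]

theorem rms_le_iff_aux (l : List Int) : ∀ (r0 : Int) (j : Nat), j < l.length → ∀ c,
    ((fb_rmsAux l (some r0)).getD j 0 ≤ c ↔ r0 ≤ c ∧ ∀ i ≤ j, l.getD i 0 ≤ c) := by
  induction l with
  | nil => intro r0 j hj; simp at hj
  | cons x t ih =>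
      intro r0 j hj c
      cases j with
      | zero =>
          simp only [fb_rmsAux, List.getD_cons_zero]
          constructor
          · intro h
            refine ⟨by split_ifs at h <;> omega, fun i hi => ?_⟩
            interval_cases i
            simpa using (by split_ifs at h <;> omega : x ≤ c)
          · rintro ⟨h1, h2⟩
            have := h2 0 le_rfl
            simp only [List.getD_cons_zero] at this
            split_ifs <;> omega
      | succ j' =>
          simp only [fb_rmsAux, List.getD_cons_succ]
          simp only [List.length_cons, Nat.succ_lt_succ_iff] at hj
          rw [ih _ j' hj c]
          constructor
          · rintro ⟨h1, h2⟩
            have hx : x ≤ c ∧ r0 ≤ c := by split_ifs at h1 <;> omega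
            refine ⟨hx.2, fun i hi => ?_⟩
            cases i with
            | zero => simpa using hx.1
            | succ i' => simpa using h2 i' (by omega)
          · rintro ⟨h1, h2⟩
            have hx : x ≤ c := by simpa using h2 0 (by omega)
            exact ⟨by split_ifs <;> omega, fun i hi => by simpa using h2 (i+1) (by omega)⟩

theorem rms_le_iff (l : List Int) (j : Nat) (hj : j < l.length) (c : Int) :
    ((fb_rmsAux l none).getD j 0 ≤ c ↔ ∀ i ≤ j, l.getD i 0 ≤ c) := by
  cases l with
  | nil => simp at hj
  | cons x t =>
      cases j with
      | zero =>
          simp only [fb_rmsAux, List.getD_cons_zero]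
          constructor
          · intro h i hi; interval_cases i; simpa using h
          · intro h; simpa using h 0 le_rfl
      | succ j' =>
          simp only [fb_rmsAux, List.getD_cons_succ]
          simp only [List.length_cons, Nat.succ_lt_succ_iff] at hj
          rw [rms_le_iff_aux t x j' hj c]
          constructor
          · rintro ⟨h1, h2⟩ i hi
            cases i with
            | zero => simpa using h1
            | succ i' => simpa using h2 i' (by omega)
          · intro h
            exact ⟨by simpa using h 0 (by omega), fun i hi => by simpa using h (i+1) (by omega)⟩

-- ---- prefix max of ends: characterization ----
theorem pme_spec_aux (l : List (Int × Int)) : ∀ (b0 : Int) (j : Nat), j < l.length →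
    ∃ M, (fb_pmeAux l (some b0)).getD j none = some M ∧
      (M = b0 ∨ ∃ p ∈ l.take (j + 1), p.2 = M) ∧ b0 ≤ M ∧ (∀ p ∈ l.take (j + 1), p.2 ≤ M) := by
  induction l with
  | nil => intro b0 j hj; simp at hj
  | cons c t ih =>
      intro b0 j hj
      cases j with
      | zero =>
          refine ⟨if c.2 > b0 then c.2 else b0, by simp [fb_pmeAux], ?_, by split_ifs <;> omega, ?_⟩
          · split_ifs with h
            · exact Or.inr ⟨c, by simp⟩
            · exact Or.inl rfl
          · intro p hp; simp at hp; subst hp; split_ifs <;> omega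
      | succ j' =>
          simp only [List.length_cons, Nat.succ_lt_succ_iff] at hj
          obtain ⟨M, hM, hor, hge, hub⟩ := ih (if c.2 > b0 then c.2 else b0) j' hj
          refine ⟨M, by simpa [fb_pmeAux] using hM, ?_, by split_ifs at hge <;> omega, ?_⟩
          · rcases hor with h | ⟨p, hp, hpe⟩
            · subst h
              split_ifs with hc
              · exact Or.inr ⟨c, by simp, rfl⟩
              · exact Or.inl rfl
            · exact Or.inr ⟨p, by simp [List.take_succ_cons]; exact Or.inr hp, hpe⟩
          · intro p hp
            rw [List.take_succ_cons, List.mem_cons] at hp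
            rcases hp with h | h
            · subst h; split_ifs at hge <;> omega
            · exact hub p h

theorem pme_spec (l : List (Int × Int)) (j : Nat) (hj : j < l.length) :
    ∃ M, (fb_pmeAux l none).getD j none = some M ∧
      (∃ p ∈ l.take (j + 1), p.2 = M) ∧ (∀ p ∈ l.take (j + 1), p.2 ≤ M) := by
  cases l with
  | nil => simp at hj
  | cons c t =>
      cases j with
      | zero => exact ⟨c.2, by simp [fb_pmeAux], ⟨c, by simp⟩, by intro p hp; simp at hp; subst hp; rfl⟩
      | succ j' =>
          simp only [List.length_cons, Nat.succ_lt_succ_iff] at hj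
          obtain ⟨M, hM, hor, hge, hub⟩ := pme_spec_aux t c.2 j' hj
          refine ⟨M, by simpa [fb_pmeAux] using hM, ?_, ?_⟩
          · rcases hor with h | ⟨p, hp, hpe⟩
            · exact ⟨c, by simp, h.symm⟩
            · exact ⟨p, by rw [List.take_succ_cons, List.mem_cons]; exact Or.inr hp, hpe⟩
          · intro p hp
            rw [List.take_succ_cons, List.mem_cons] at hp
            rcases hp with h | h
            · subst h; exact hge
            · exact hub p h

-- ---- binary search ----
theorem bsearch_correct (rms : List Int) (e : Int)
    (hmono : ∀ i j, i ≤ j → j < rms.length → rms.getD i 0 ≤ rms.getD j 0) :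
    ∀ (k lo hi : Nat), hi - lo = k → lo ≤ hi → hi ≤ rms.length →
      (∀ j < lo, rms.getD j 0 ≤ e) → (∀ j, hi ≤ j → j < rms.length → e < rms.getD j 0) →
      lo ≤ fb_bsearch rms e lo hi ∧ fb_bsearch rms e lo hi ≤ hi ∧
      (∀ j < fb_bsearch rms e lo hi, rms.getD j 0 ≤ e) ∧
      (fb_bsearch rms e lo hi < rms.length → e < rms.getD (fb_bsearch rms e lo hi) 0) := by
  intro k
  induction k using Nat.strong_induction_on with
  | _ k ih =>
      intro lo hi hk hlohi hhi hlow hhigh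
      rw [fb_bsearch]
      by_cases h : lo < hi
      · rw [dif_pos h]
        by_cases hm : rms.getD ((lo + hi) / 2) 0 > e
        · rw [if_pos hm]
          have hrec := ih ((lo + hi) / 2 - lo) (by omega) lo ((lo + hi) / 2) rfl (by omega) (by omega)
            hlow (fun j hj hjl => lt_of_lt_of_le hm (hmono _ j hj hjl))
          obtain ⟨a, b, c, d⟩ := hrec
          exact ⟨a, by omega, c, d⟩
        · rw [if_neg hm]
          have hle : ∀ j < (lo + hi) / 2 + 1, rms.getD j 0 ≤ e := fun j hj =>
            le_trans (hmono j ((lo + hi) / 2) (by omega) (by omega)) (by omega)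
          have hrec := ih (hi - ((lo + hi) / 2 + 1)) (by omega) ((lo + hi) / 2 + 1) hi rfl
            (by omega) hhi hle hhigh
          obtain ⟨a, b, c, d⟩ := hrec
          exact ⟨by omega, b, c, d⟩
      · rw [dif_neg h]
        have : lo = hi := by omega
        subst this
        exact ⟨le_rfl, le_rfl, hlow, fun hl => hhigh lo le_rfl hl⟩

-- N := the binary-search result on the full range, phrased via starts
theorem fb_spec (ex : List (Int × Int)) (e : Int) :
    let starts := ex.map (fun c => c.1)
    let N := fb_bsearch (fb_rmsAux starts none) e 0 ex.length
    N ≤ ex.length ∧ (∀ j < N, starts.getD j 0 ≤ e) ∧ (N < ex.length → e < starts.getD N 0) := by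
  intro starts N
  have hlen : starts.length = ex.length := List.length_map _
  have hrl : (fb_rmsAux starts none).length = starts.length := rms_length _ _
  have hmono : ∀ i j, i ≤ j → j < (fb_rmsAux starts none).length →
      (fb_rmsAux starts none).getD i 0 ≤ (fb_rmsAux starts none).getD j 0 := by
    intro i j hij hj
    rw [hrl] at hj
    rw [rms_le_iff starts i (by omega) _]
    intro i' hi'
    exact ((rms_le_iff starts j hj ((fb_rmsAux starts none).getD j 0)).1 le_rfl) i' (by omega)
  obtain ⟨h1, h2, h3, h4⟩ := bsearch_correct (fb_rmsAux starts none) e hmono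
    (ex.length - 0) 0 ex.length rfl (by omega) (by omega)
    (by omega) (by intro j hj hjl; omega)
  refine ⟨h2, ?_, ?_⟩
  · intro j hj
    have := ((rms_le_iff starts j (by omega) e).1 (h3 j hj)) j le_rfl
    exact this
  · intro hN
    have hN' : e < (fb_rmsAux starts none).getD N 0 := h4 (by omega)
    by_contra hcon
    rw [Int.not_lt] at hcon
    have hall : ∀ i ≤ N, starts.getD i 0 ≤ e := by
      intro i hi
      rcases Nat.lt_or_ge i N with h | h
      · exact ((rms_le_iff starts i (by omega) e).1 (h3 i h)) i le_rfl
      · have : i = N := by omega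
        subst this; exact hcon
    have := (rms_le_iff starts N (by omega) e).2 hall
    omega

-- ---- A's inner loop: closed form over the unbroken prefix ----
theorem innerA_char (s e tr curL curR : Int) :
    ∀ (l : List (Int × Int)) (n : Nat) (i : Int) (aL aR : List Int),
      n ≤ l.length → (∀ j < n, (l.getD j (0,0)).1 ≤ e) → (n < l.length → e < (l.getD n (0,0)).1) →
      fa_innerA s e tr curL curR l i aL aR =
        (aL ++ (((l.take n).take ((tr - i).toNat)).filter (fun p => decide (s < p.2))).map
            (fun p => if p.2 - s < curL then p.2 - s else curL),
         aR ++ (((l.take n).drop ((tr + 1 - i).toNat)).filter (fun p => decide (p.1 < e))).map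
            (fun p => if e - p.1 < curR then e - p.1 else curR)) := by
  intro l
  induction l with
  | nil =>
      intro n i aL aR h1 _ _
      have : n = 0 := by simpa using h1
      subst this
      simp [fa_innerA]
  | cons hd t ih =>
      obtain ⟨es, ee⟩ := hd
      intro n i aL aR h1 h2 h3
      cases n with
      | zero =>
          have he : e < es := by simpa using h3 (by simp)
          rw [fa_innerA, if_pos (by exact he)]
          simp
      | succ n' =>
          have hlen : n' ≤ t.length := by simp at h1; omega
          have hes : es ≤ e := by simpa using h2 0 (Nat.succ_pos n')
          have h2' : ∀ j < n', (t.getD j (0,0)).1 ≤ e := fun j hj => by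
            simpa using h2 (j+1) (by omega)
          have h3' : n' < t.length → e < (t.getD n' (0,0)).1 := fun hl => by
            simpa using h3 (by simp only [List.length_cons]; omega)
          rw [List.take_succ_cons]
          by_cases hitr : i = tr
          · subst hitr
            rw [fa_innerA, if_neg (by omega), if_pos rfl]
            rw [ih n' (i+1) aL aR hlen h2' h3']
            simp [show ((i:Int) - (i+1)).toNat = 0 by omega,
                  show ((i:Int) - i).toNat = 0 by omega,
                  show ((i:Int) + 1 - (i+1)).toNat = 0 by omega,
                  show ((i:Int) + 1 - i).toNat = 1 by omega]
          · rw [fa_innerA, if_neg (by omega), if_neg hitr]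
            dsimp only
            rw [ih n' (i+1) _ _ hlen h2' h3']
            rcases lt_trichotomy i tr with hlt | heq | hgt
            · -- i < tr : a left candidate may be emitted, the right range excludes the head
              have hL : ((tr - i).toNat) = ((tr - (i+1)).toNat) + 1 := by omega
              have hR : ((tr + 1 - i).toNat) = ((tr + 1 - (i+1)).toNat) + 1 := by omega
              rw [hL, hR, List.take_succ_cons, List.drop_succ_cons]
              rw [if_neg (by omega : ¬ (i > tr ∧ e > es))]
              by_cases hsee : s < ee
              · rw [if_pos ⟨hlt, hsee⟩, List.filter_cons_of_pos (by simpa using hsee), List.map_cons]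
                simp
              · rw [if_neg (fun hc => hsee hc.2), List.filter_cons_of_neg (by simpa using hsee)]
            · exact absurd heq hitr
            · -- i > tr : a right candidate may be emitted, the left range is empty
              rw [show ((tr - i).toNat) = 0 by omega, show ((tr - (i+1)).toNat) = 0 by omega,
                  show ((tr + 1 - i).toNat) = 0 by omega, show ((tr + 1 - (i+1)).toNat) = 0 by omega]
              rw [if_neg (fun hc => absurd hc.1 (by omega : ¬ i < tr))]
              simp only [List.take_zero, List.drop_zero]
              by_cases hese : e > es
              · rw [if_pos ⟨hgt, hese⟩, List.filter_cons_of_pos (by simpa using hese), List.map_cons]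
                simp
              · rw [if_neg (fun hc => hese hc.2), List.filter_cons_of_neg (by simpa using hese)]

-- ---- per-locus agreement of the two updates ----
theorem left_eq (ex : List (Int × Int)) (s tr curL : Int) (N : Nat) (hN : N ≤ ex.length) :
    ∀ (L : List Int) (k : Int) (M : Int),
      L = (((ex.take N).take ((tr - 0).toNat)).filter (fun p => decide (s < p.2))).map
            (fun p => if p.2 - s < curL then p.2 - s else curL) →
      k = (if tr > (N:Int) then (N:Int) else if tr > 0 then tr else 0) →
      M = ((((none : Option Int) :: fb_pmeAux ex none).getD k.toNat none).getD 0) →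
      ((L ≠ [] ↔ (0 < k ∧ s < M)) ∧
       (L ≠ [] → (PySem.List.max? L (fun y => y)).getD 0 = min (M - s) curL)) := by
  intro L k M hL hk hM
  have hkN : k.toNat = min tr.toNat N := by subst hk; split_ifs <;> omega
  have htake : (ex.take N).take ((tr - 0).toNat) = ex.take k.toNat := by
    rw [List.take_take]
    congr 1
    omega
  by_cases hk0 : 0 < k.toNat
  · obtain ⟨Mv, hMv, ⟨p0, hp0mem, hp0⟩, hub⟩ := pme_spec ex (k.toNat - 1) (by omega)
    rw [show (k.toNat - 1) + 1 = k.toNat by omega] at hp0mem hub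
    have hMeq : M = Mv := by
      rw [hM, show k.toNat = (k.toNat - 1) + 1 by omega, List.getD_cons_succ, hMv]
      rfl
    by_cases hsM : s < Mv
    · have hp0f : p0 ∈ ((ex.take N).take ((tr - 0).toNat)).filter (fun p => decide (s < p.2)) := by
        rw [htake, List.mem_filter]
        exact ⟨hp0mem, by simpa [hp0] using hsM⟩
      have hLne : L ≠ [] := by
        rw [hL]
        intro hc
        rw [List.map_eq_nil_iff] at hc
        rw [hc] at hp0f
        cases hp0f
      refine ⟨⟨fun _ => ⟨by omega, by omega⟩, fun _ => hLne⟩, fun _ => ?_⟩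
      have hvmem : (if Mv - s < curL then Mv - s else curL) ∈ L := by
        rw [hL]
        exact List.mem_map.2 ⟨p0, hp0f, by rw [hp0]⟩
      have hvub : ∀ x ∈ L, x ≤ (if Mv - s < curL then Mv - s else curL) := by
        rw [hL]
        intro x hx
        obtain ⟨p, hp, hpx⟩ := List.mem_map.1 hx
        rw [List.mem_filter, htake] at hp
        have := hub p hp.1
        subst hpx
        split_ifs <;> omega
      rw [max_id_eq_of L _ hvmem hvub]
      simp only [Option.getD_some]
      rw [hMeq, min_def]
      split_ifs <;> omega
    · have hLnil : L = [] := by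
        rw [hL, htake, List.map_eq_nil_iff, List.filter_eq_nil_iff]
        intro p hp
        have := hub p hp
        simpa using by omega
      refine ⟨⟨fun hc => absurd hLnil hc, fun hc => absurd (by omega : ¬ s < M) (fun h => h hc.2)⟩,
              fun hc => absurd hLnil hc⟩
  · have hLnil : L = [] := by
      rw [hL, htake, show k.toNat = 0 by omega, List.take_zero, List.filter_nil, List.map_nil]
    exact ⟨⟨fun hc => absurd hLnil hc, fun hc => absurd hc.1 (by omega)⟩,
           fun hc => absurd hLnil hc⟩

theorem right_eq (ex : List (Int × Int)) (e tr curR : Int) (N : Nat) (hN : N ≤ ex.length) :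
    ∀ (R : List Int) (lo2 : Int) (mn : Int),
      R = (((ex.take N).drop ((tr + 1 - 0).toNat)).filter (fun p => decide (p.1 < e))).map
            (fun p => if e - p.1 < curR then e - p.1 else curR) →
      lo2 = (if tr + 1 > 0 then tr + 1 else 0) →
      mn = ((PySem.List.min? (PySem.List.slice (ex.map (fun c => c.1)) (some lo2) (some (N:Int))) (fun y => y)).getD 0) →
      ((R ≠ [] ↔ (lo2 < (N:Int) ∧ mn < e)) ∧
       (R ≠ [] → (PySem.List.max? R (fun y => y)).getD 0 = min (e - mn) curR)) := by
  intro R lo2 mn hR hlo2 hmn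
  have hlo2' : lo2 = (((tr + 1).toNat : Nat) : Int) := by subst hlo2; split_ifs <;> omega
  have hdeq : ((tr + 1 - 0).toNat) = (tr + 1).toNat := by omega
  rw [hdeq] at hR
  have hslice : PySem.List.slice (ex.map (fun c => c.1)) (some lo2) (some (N:Int)) =
      ((ex.take N).drop ((tr + 1).toNat)).map (fun c => c.1) := by
    rw [hlo2', PySem.List.slice_natCast, ← List.map_drop, ← List.map_take, List.drop_take]
  by_cases hguard : (tr + 1).toNat < N
  · have hFlen : ((ex.take N).drop ((tr + 1).toNat)).length = N - (tr + 1).toNat := by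
      rw [List.length_drop, List.length_take]
      omega
    have hFne : ((ex.take N).drop ((tr + 1).toNat)) ≠ [] := by
      intro hc
      rw [hc] at hFlen
      simp at hFlen
      omega
    have hsne : PySem.List.slice (ex.map (fun c => c.1)) (some lo2) (some (N:Int)) ≠ [] := by
      rw [hslice]
      simpa using hFne
    obtain ⟨mnv, hmnv⟩ : ∃ v, PySem.List.min? (PySem.List.slice (ex.map (fun c => c.1)) (some lo2) (some (N:Int))) (fun y => y) = some v := by
      cases hc : PySem.List.min? (PySem.List.slice (ex.map (fun c => c.1)) (some lo2) (some (N:Int))) (fun y => y) with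
      | none => exact absurd ((PySem.List.min?_eq_none_iff _ _).1 hc) hsne
      | some v => exact ⟨v, rfl⟩
    have hmneq : mn = mnv := by rw [hmn, hmnv]; rfl
    have hmem : mnv ∈ ((ex.take N).drop ((tr + 1).toNat)).map (fun c => c.1) := by
      rw [← hslice]; exact PySem.List.min?_mem hmnv
    have hlb : ∀ p ∈ (ex.take N).drop ((tr + 1).toNat), mnv ≤ p.1 := by
      intro p hp
      exact PySem.List.min?_isMin hmnv p.1 (by rw [hslice]; exact List.mem_map.2 ⟨p, hp, rfl⟩)
    obtain ⟨p0, hp0mem, hp0⟩ := List.mem_map.1 hmem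
    by_cases hmne : mnv < e
    · have hp0f : p0 ∈ ((ex.take N).drop ((tr + 1).toNat)).filter (fun p => decide (p.1 < e)) :=
        List.mem_filter.2 ⟨hp0mem, by simpa [hp0] using hmne⟩
      have hRne : R ≠ [] := by
        rw [hR]
        intro hc
        rw [List.map_eq_nil_iff] at hc
        rw [hc] at hp0f
        cases hp0f
      refine ⟨⟨fun _ => ⟨by omega, by omega⟩, fun _ => hRne⟩, fun _ => ?_⟩
      have hvmem : (if e - mnv < curR then e - mnv else curR) ∈ R := by
        rw [hR]
        exact List.mem_map.2 ⟨p0, hp0f, by rw [hp0]⟩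
      have hvub : ∀ x ∈ R, x ≤ (if e - mnv < curR then e - mnv else curR) := by
        rw [hR]
        intro x hx
        obtain ⟨p, hp, hpx⟩ := List.mem_map.1 hx
        rw [List.mem_filter] at hp
        have := hlb p hp.1
        subst hpx
        split_ifs <;> omega
      rw [max_id_eq_of R _ hvmem hvub]
      simp only [Option.getD_some]
      rw [hmneq, min_def]
      split_ifs <;> omega
    · have hRnil : R = [] := by
        rw [hR, List.map_eq_nil_iff, List.filter_eq_nil_iff]
        intro p hp
        have := hlb p hp
        simpa using by omega
      refine ⟨⟨fun hc => absurd hRnil hc, fun hc => absurd hc.2 (by omega)⟩,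
              fun hc => absurd hRnil hc⟩
  · have hRnil : R = [] := by
      rw [hR, List.drop_eq_nil_of_le (by rw [List.length_take]; omega), List.filter_nil, List.map_nil]
    exact ⟨⟨fun hc => absurd hRnil hc, fun hc => absurd hc.1 (by omega)⟩,
           fun hc => absurd hRnil hc⟩
theorem outer_eq (ex : List (Int × Int)) (tracker : List Int) :
    ∀ (loci : List (Int × Int)) (idx : Nat) (rl ll : List Int),
      fa_outerA ex tracker loci idx rl ll =
      fb_outerB (ex.map (fun c => c.1)) (fb_rmsAux (ex.map (fun c => c.1)) none)
        ((none : Option Int) :: fb_pmeAux ex none) ex.length tracker loci idx rl ll := by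
  intro loci
  induction loci with
  | nil => intro idx rl ll; rfl
  | cons hd rest ih =>
      intro idx rl ll
      obtain ⟨s, e⟩ := hd
      simp only [fa_outerA, fb_outerB]
      obtain ⟨hN, hpre, hbrk⟩ := fb_spec ex e
      have hmap : ∀ j, j < ex.length → (ex.map (fun c => c.1)).getD j 0 = (ex.getD j (0,0)).1 := by
        intro j hj
        rw [List.getD_eq_getElem?_getD, List.getD_eq_getElem?_getD, List.getElem?_map,
            List.getElem?_eq_getElem hj]
        simp
      have hinner := innerA_char s e (tracker.getD idx 0) (ll.getD idx 0) (rl.getD idx 0) ex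
        (fb_bsearch (fb_rmsAux (ex.map (fun c => c.1)) none) e 0 ex.length) 0 [] [] hN
        (fun j hj => by rw [← hmap j (by omega)]; exact hpre j hj)
        (fun hl => by rw [← hmap _ hl]; exact hbrk hl)
      simp only [List.nil_append] at hinner
      rw [hinner]
      obtain ⟨hLiff, hLval⟩ := left_eq ex s (tracker.getD idx 0) (ll.getD idx 0)
        (fb_bsearch (fb_rmsAux (ex.map (fun c => c.1)) none) e 0 ex.length) hN _ _ _ rfl rfl rfl
      obtain ⟨hRiff, hRval⟩ := right_eq ex e (tracker.getD idx 0) (rl.getD idx 0)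
        (fb_bsearch (fb_rmsAux (ex.map (fun c => c.1)) none) e 0 ex.length) hN _ _ _ rfl rfl rfl
      rw [ih]
      congr 1
      · -- the right-flank update
        by_cases hCR : (((ex.take (fb_bsearch (fb_rmsAux (ex.map (fun c => c.1)) none) e 0 ex.length)).drop
              (((tracker.getD idx 0) + 1 - 0).toNat)).filter (fun p => decide (p.1 < e))).map
              (fun p => if e - p.1 < rl.getD idx 0 then e - p.1 else rl.getD idx 0) ≠ []
        · obtain ⟨hg1, hg2⟩ := hRiff.1 hCR
          rw [if_pos hCR, if_pos hg1, if_pos hg2, hRval hCR]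
        · have hng := fun h1 h2 => hCR (hRiff.2 ⟨h1, h2⟩)
          rw [if_neg hCR]
          by_cases hg1 : (if (tracker.getD idx 0) + 1 > 0 then (tracker.getD idx 0) + 1 else 0) <
              ((fb_bsearch (fb_rmsAux (ex.map (fun c => c.1)) none) e 0 ex.length : Nat) : Int)
          · rw [if_pos hg1, if_neg (hng hg1)]
          · rw [if_neg hg1]
      · -- the left-flank update
        by_cases hCL : (((ex.take (fb_bsearch (fb_rmsAux (ex.map (fun c => c.1)) none) e 0 ex.length)).take
              (((tracker.getD idx 0) - 0).toNat)).filter (fun p => decide (s < p.2))).map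
              (fun p => if p.2 - s < ll.getD idx 0 then p.2 - s else ll.getD idx 0) ≠ []
        · obtain ⟨hg1, hg2⟩ := hLiff.1 hCL
          rw [if_pos hCL, if_pos ⟨hg1, hg2⟩, hLval hCL]
        · rw [if_neg hCL, if_neg (fun hg => hCL (hLiff.2 hg))]

-- ===== VERDICT (by name: the statement is the Claim_ definition above) =====
theorem flank_adjustment_spec : Claim_equal_flank_adjustment := by
  intro lc ex rf lf ti _ _
  unfold Spec_flank_adjustment flank_adjustment flank_adjustment_alt
  rw [outer_eq]
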